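-- pv_equiv track=rewrite | github.com/FabianJnr/CSCI-121 | three_prod.py | three_prod
-- ===== SOURCE A (Python) =====
-- def three_prod(number):
--     products_list = []
--     for first_factor in range(1, number + 1):
--         for second_factor in range(first_factor, number + 1):
--             for third_factor in range(second_factor, number + 1):
--                 if first_factor * second_factor * third_factor == number:
--                     products_list.append(number)
--     return len(products_list)
-- ===== SOURCE B (Python) =====
-- def three_prod(number):
--     count = 0
--     for a in range(1, number + 1):
--         for b in range(a, number + 1):
--             p = a * b
--             if number % p == 0 and number // p >= b:
--                 count += 1
--     return count
-- ===== Notes on version B (the rewrite author's own statement) =====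
-- stated objective: faster
-- what changed: The innermost loop over the third factor is removed: for each pair (a,b) the unique candidate third factor is obtained by a divisibility check and one integer division, turning the triple loop into a double loop.
import Mathlib
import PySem

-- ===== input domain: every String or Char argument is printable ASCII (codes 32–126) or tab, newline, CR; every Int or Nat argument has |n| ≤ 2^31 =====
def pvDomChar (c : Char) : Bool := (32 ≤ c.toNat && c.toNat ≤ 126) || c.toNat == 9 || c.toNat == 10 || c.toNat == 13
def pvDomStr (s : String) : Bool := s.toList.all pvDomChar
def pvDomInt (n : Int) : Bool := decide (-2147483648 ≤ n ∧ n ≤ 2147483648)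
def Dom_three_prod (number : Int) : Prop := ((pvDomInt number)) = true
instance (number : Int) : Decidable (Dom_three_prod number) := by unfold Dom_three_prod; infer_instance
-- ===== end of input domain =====

-- B replaces A's innermost scan for the third factor by a divisibility check and an
-- integer division for each pair (a,b): a double loop instead of a triple loop.

-- ===== PORT A =====
def three_prod (number : Int) : Int :=
  let products_list : List Int :=
    (PySem.List.pyRange 1 (number + 1) 1).foldl (fun acc first_factor =>
      (PySem.List.pyRange first_factor (number + 1) 1).foldl (fun acc second_factor =>
        (PySem.List.pyRange second_factor (number + 1) 1).foldl (fun acc third_factor =>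
          if first_factor * second_factor * third_factor == number then acc ++ [number] else acc)
          acc) acc) []
  (products_list.length : Int)

-- ===== PORT B =====
def three_prod_alt (number : Int) : Int :=
  (PySem.List.pyRange 1 (number + 1) 1).foldl (fun count a =>
    (PySem.List.pyRange a (number + 1) 1).foldl (fun count b =>
      let p := a * b
      if PySem.Int.mod number p = 0 ∧ PySem.Int.floordiv number p ≥ b then count + 1 else count)
      count) 0

-- ===== PRECONDITION & SPEC =====
def Spec_three_prod (number : Int) (out : Int) : Prop := out = three_prod_alt number
instance (number : Int) (out : Int) : Decidable (Spec_three_prod number out) := by unfold Spec_three_prod; infer_instance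

-- ===== CLAIM (what is proved, stated in full; the proofs are below) =====
def Claim_equal_three_prod : Prop := ∀ (number : Int), Dom_three_prod number → Spec_three_prod number (three_prod number)

-- ===== LEMMAS AND PROOFS =====

-- Generic bridge: if B's step keeps its counter equal to the length of A's accumulator
-- at every element of the list, the final counter is the final length.
lemma foldl_bridge {α : Type} (l : List α) (fA : List Int → α → List Int) (fB : Int → α → Int)
    (h : ∀ x ∈ l, ∀ (acc : List Int) (cnt : Int), cnt = (acc.length : Int) →
        fB cnt x = ((fA acc x).length : Int)) :
    ∀ (acc : List Int) (cnt : Int), cnt = (acc.length : Int) →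
      l.foldl fB cnt = ((l.foldl fA acc).length : Int) := by
  induction l with
  | nil => intro acc cnt hc; simpa using hc
  | cons x xs ih =>
    intro acc cnt hc
    simp only [List.foldl_cons]
    exact ih (fun y hy => h y (List.mem_cons_of_mem _ hy)) _ _
      (h x (List.mem_cons_self) acc cnt hc)

-- For a fixed admissible pair (a,b), A's innermost loop finds either exactly one third
-- factor or none, and B's arithmetic test decides which.
lemma inner_count (n a b : Int) (ha : 1 ≤ a) (hab : a ≤ b) (hbn : b < n + 1) :
    ((PySem.List.pyRange b (n + 1) 1).countP (fun c => a * b * c == n) : Int)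
      = if PySem.Int.mod n (a * b) = 0 ∧ PySem.Int.floordiv n (a * b) ≥ b then 1 else 0 := by
  have hp : 0 < a * b := by nlinarith
  have hn1 : 1 ≤ n := by omega
  simp only [PySem.Int.mod_eq_zero_iff_dvd, PySem.Int.floordiv_eq_ediv_of_pos hp, ge_iff_le]
  by_cases hdvd : a * b ∣ n
  · obtain ⟨c0, hc0⟩ := hdvd
    have hab0 : a * b ≠ 0 := by positivity
    have hc0' : n / (a * b) = c0 := by
      rw [hc0]; exact Int.mul_ediv_cancel_left _ hab0
    have hpred : ∀ c : Int, (a * b * c == n) = (c == c0) := by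
      intro c
      by_cases h : c = c0
      · simp [h, hc0.symm]
      · have hne : a * b * c ≠ n := by
          rw [hc0]; intro hh
          exact h (mul_left_cancel₀ hab0 hh)
        simp [h, hne]
    rw [List.countP_congr (fun c _ => by rw [hpred c])]
    have hcount : (PySem.List.pyRange b (n + 1) 1).countP (fun c => c == c0)
        = (PySem.List.pyRange b (n + 1) 1).count c0 := by
      simp [List.count_eq_countP]
    rw [hcount, hc0']
    by_cases hge : b ≤ c0
    · have hc0pos : 1 ≤ c0 := by omega
      have hc0n : c0 < n + 1 := by nlinarith
      have hmem : c0 ∈ PySem.List.pyRange b (n + 1) 1 :=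
        (PySem.List.mem_pyRange_one).2 ⟨hge, hc0n⟩
      rw [List.count_eq_one_of_mem (PySem.List.nodup_pyRange_one _ _) hmem]
      rw [if_pos ⟨⟨c0, hc0⟩, hge⟩]
      simp
    · have hnmem : c0 ∉ PySem.List.pyRange b (n + 1) 1 := by
        rw [PySem.List.mem_pyRange_one]; omega
      rw [List.count_eq_zero.2 hnmem, if_neg (fun hcond => hge hcond.2)]
      simp
  · have hall : ∀ c ∈ PySem.List.pyRange b (n + 1) 1, ¬ (a * b * c == n) = true := by
      intro c _ h
      exact hdvd ⟨c, (beq_iff_eq.1 h).symm⟩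
    rw [List.countP_eq_zero.2 hall, if_neg (fun hcond => hdvd hcond.1)]
    simp

-- A's innermost loop appends one copy of n per matching third factor.
lemma innerA_len (n a b : Int) (acc : List Int) :
    (((PySem.List.pyRange b (n + 1) 1).foldl (fun acc c =>
        if a * b * c == n then acc ++ [n] else acc) acc).length : Int)
      = (acc.length : Int)
        + ((PySem.List.pyRange b (n + 1) 1).countP (fun c => a * b * c == n) : Int) := by
  rw [PySem.List.foldl_append_if]
  simp [List.countP_eq_length_filter]

theorem three_prod_spec : Claim_equal_three_prod := by
  intro n _
  unfold Spec_three_prod three_prod three_prod_alt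
  refine (foldl_bridge _ _ _ ?_ [] 0 (by simp)).symm
  intro a ha acc cnt hc
  have ha' := (PySem.List.mem_pyRange_one).1 ha
  refine foldl_bridge _ _ _ ?_ acc cnt hc
  intro b hb acc cnt hc
  have hb' := (PySem.List.mem_pyRange_one).1 hb
  rw [innerA_len, inner_count n a b ha'.1 hb'.1 hb'.2, ← hc]
  simp only [ge_iff_le]
  split <;> simp

-- ===== VERDICT (by name: the statement is the Claim_ definition above) =====
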